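-- pv_equiv track=rewrite | github.com/RishabhS21/COL215-Assignments | A3/2021CS10103_2021CS10119_assignment_3.py | convert_bool
-- ===== SOURCE A (Python) =====
-- def convert_bool(s):
--     s1 = ''
--     c1 = ''
--     for c in s:
--         if c == "'":
--             s1 += '0'
--             c1 = ''
--         elif len(c1) == 0:
--             c1 += c
--         elif len(c1) != 0:
--             s1 += '1'
--             c1 = c
--     if len(c1) == 1:
--         s1 += '1'
--     return s1
-- ===== SOURCE B (Python) =====
-- def convert_bool(s):
--     n = len(s)
--     out = []
--     for i, c in enumerate(s):
--         if c == "'":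
--             out.append('0')
--         elif i + 1 == n or s[i + 1] != "'":
--             out.append('1')
--     return ''.join(out)
-- ===== Notes on version B (the rewrite author's own statement) =====
-- stated objective: simpler
-- what changed: Replaces A's deferred one-character buffer state with a stateless lookahead pass: each character's output ('0', '1', or nothing) is decided directly from it and its successor, collected in a list and joined once.
import Mathlib
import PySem

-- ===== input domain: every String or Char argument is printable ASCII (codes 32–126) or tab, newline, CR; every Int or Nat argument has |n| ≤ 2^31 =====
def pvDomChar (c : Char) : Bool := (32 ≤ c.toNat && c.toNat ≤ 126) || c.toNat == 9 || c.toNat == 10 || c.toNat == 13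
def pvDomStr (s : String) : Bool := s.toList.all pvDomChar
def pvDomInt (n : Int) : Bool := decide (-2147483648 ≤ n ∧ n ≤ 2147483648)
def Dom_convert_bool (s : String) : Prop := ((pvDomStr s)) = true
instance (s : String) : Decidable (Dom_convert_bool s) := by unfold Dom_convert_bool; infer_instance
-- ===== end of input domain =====

-- B replaces A's deferred one-character buffer with a stateless lookahead pass (simpler decomposition).

-- ===== PORT A =====
-- A's loop: state (s1, c1); c1 is the pending buffer (length 0 or 1), modelled as List Char.
def convertBoolStep (st : List Char × List Char) (c : Char) : List Char × List Char :=
  if c = '\'' then (st.1 ++ ['0'], [])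
  else if st.2.length = 0 then (st.1, st.2 ++ [c])
  else (st.1 ++ ['1'], [c])

def convert_bool (s : String) : String :=
  let r := s.toList.foldl convertBoolStep ([], [])
  String.mk (if r.2.length = 1 then r.1 ++ ['1'] else r.1)

-- ===== PORT B =====
-- B's lookahead pass: '0' for a quote, nothing for a non-quote followed by a quote, '1' otherwise
-- (including the last character).
def convertBoolAltGo : List Char → List Char
  | [] => []
  | [c] => if c = '\'' then ['0'] else ['1']
  | c :: d :: rest =>
      (if c = '\'' then ['0'] else if d = '\'' then [] else ['1']) ++ convertBoolAltGo (d :: rest)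

def convert_bool_alt (s : String) : String := String.mk (convertBoolAltGo s.toList)

-- ===== PRECONDITION & SPEC =====
def Spec_convert_bool (s : String) (out : String) : Prop := out = convert_bool_alt s
instance (s : String) (out : String) : Decidable (Spec_convert_bool s out) := by unfold Spec_convert_bool; infer_instance

-- ===== CLAIM (what is proved, stated in full; the proofs are below) =====
def Claim_equal_convert_bool : Prop := ∀ (s : String), Dom_convert_bool s → Spec_convert_bool s (convert_bool s)

-- ===== LEMMAS AND PROOFS =====

-- F ('0'-prefixed) on a leading quote
theorem convertBoolAltGo_quote_cons (r : List Char) :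
    convertBoolAltGo ('\'' :: r) = '0' :: convertBoolAltGo r := by
  cases r with
  | nil => simp [convertBoolAltGo]
  | cons d rest => simp [convertBoolAltGo]

-- F on a leading non-quote: '1' exactly when the next character is absent or not a quote
theorem convertBoolAltGo_nonquote_cons (c : Char) (r : List Char) (hc : c ≠ '\'') :
    convertBoolAltGo (c :: r) =
      (match r with
       | [] => ['1']
       | d :: _ => if d = '\'' then [] else ['1']) ++ convertBoolAltGo r := by
  cases r with
  | nil => simp [convertBoolAltGo, hc]
  | cons d rest => simp [convertBoolAltGo, hc]

def convertBoolFin (r : List Char × List Char) : List Char :=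
  if r.2.length = 1 then r.1 ++ ['1'] else r.1

theorem convertBoolStep_quote (a buf : List Char) :
    convertBoolStep (a, buf) '\'' = (a ++ ['0'], []) := by simp [convertBoolStep]

theorem convertBoolStep_empty (a : List Char) (c : Char) (hc : c ≠ '\'') :
    convertBoolStep (a, []) c = (a, [c]) := by simp [convertBoolStep, hc]

theorem convertBoolStep_full (a : List Char) (b c : Char) (hc : c ≠ '\'') :
    convertBoolStep (a, [b]) c = (a ++ ['1'], [c]) := by simp [convertBoolStep, hc]

-- Main loop invariant: A's fold from (acc, []) finishes to acc ++ F l, and from (acc, [b])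
-- it additionally emits '1' for the buffered character unless the next character is a quote.
theorem convert_bool_loop (l : List Char) :
    (∀ acc : List Char,
        convertBoolFin (l.foldl convertBoolStep (acc, [])) = acc ++ convertBoolAltGo l) ∧
    (∀ (acc : List Char) (b : Char),
        convertBoolFin (l.foldl convertBoolStep (acc, [b])) =
          acc ++ (match l with
                  | [] => ['1']
                  | c :: _ => if c = '\'' then [] else ['1']) ++ convertBoolAltGo l) := by
  induction l with
  | nil =>
      constructor
      · intro acc; simp [convertBoolFin, convertBoolAltGo]
      · intro acc b; simp [convertBoolFin, convertBoolAltGo]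
  | cons c r ih =>
      constructor
      · intro acc
        by_cases hc : c = '\''
        · subst hc
          rw [List.foldl_cons, convertBoolStep_quote, ih.1, convertBoolAltGo_quote_cons]
          simp
        · rw [List.foldl_cons, convertBoolStep_empty acc c hc, ih.2,
            convertBoolAltGo_nonquote_cons c r hc]
          simp
      · intro acc b
        by_cases hc : c = '\''
        · subst hc
          rw [List.foldl_cons, convertBoolStep_quote, ih.1, convertBoolAltGo_quote_cons]
          simp
        · rw [List.foldl_cons, convertBoolStep_full acc b c hc, ih.2,
            convertBoolAltGo_nonquote_cons c r hc]
          simp [hc]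

-- ===== VERDICT (by name: the statement is the Claim_ definition above) =====
theorem convert_bool_spec : Claim_equal_convert_bool := by
  intro s _
  show convert_bool s = convert_bool_alt s
  unfold convert_bool convert_bool_alt
  have h := (convert_bool_loop s.toList).1 []
  simp only [convertBoolFin] at h
  simp [h]
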